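-- pv_equiv track=rewrite | github.com/Alex-Winterfish/Sky_pro_Home_Work | src/transaction_search.py | transaction_count
-- ===== SOURCE A (Python) =====
-- def transaction_count(transaction_list:list, transaction_type:list)->dict:
--
--     from collections import Counter
--     list_of_transaction = list()
--     for i in range(len(transaction_list)):
--         if transaction_list[i].get("description") != "":
--             list_of_transaction.append(transaction_list[i].get("description"))
--     counted_transactions = Counter(list_of_transaction)
--     output_dict = dict()
--     for types in transaction_type:
--         output_dict[types] = counted_transactions[types]
--
--
--
--     return output_dict
-- ===== SOURCE B (Python) =====
-- def transaction_count(transaction_list: list, transaction_type: list) -> dict: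
--     output_dict = {}
--     for t in transaction_type:
--         output_dict[t] = 0 if t == "" else sum(
--             1 for tr in transaction_list if tr.get("description") == t
--         )
--     return output_dict
-- ===== Notes on version B (the rewrite author's own statement) =====
-- stated objective: simpler
-- what changed: Drops the Counter and the intermediate filtered list: for each requested type the count is computed by a direct scan of the transactions (with an explicit 0 for the empty-string type, which A's '' filter makes unreachable).
import Mathlib
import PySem

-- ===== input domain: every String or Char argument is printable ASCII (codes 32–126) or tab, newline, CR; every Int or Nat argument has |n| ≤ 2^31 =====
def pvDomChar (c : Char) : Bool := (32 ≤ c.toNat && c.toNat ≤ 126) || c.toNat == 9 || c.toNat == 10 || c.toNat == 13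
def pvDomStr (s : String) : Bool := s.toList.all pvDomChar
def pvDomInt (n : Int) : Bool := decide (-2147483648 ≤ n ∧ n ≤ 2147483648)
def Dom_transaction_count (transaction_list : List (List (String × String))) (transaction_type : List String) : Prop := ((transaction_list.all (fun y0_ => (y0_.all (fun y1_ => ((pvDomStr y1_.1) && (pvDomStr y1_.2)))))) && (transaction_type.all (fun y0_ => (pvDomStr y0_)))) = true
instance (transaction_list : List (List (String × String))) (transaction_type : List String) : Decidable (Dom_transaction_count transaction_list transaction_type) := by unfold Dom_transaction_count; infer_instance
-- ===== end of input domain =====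

-- B drops A's Counter and intermediate filtered list and counts each requested type by a direct scan (simpler).

-- ===== PORT A =====
-- index loop 'for i in range(len(...))' ported with pyRange/pyGetD (the default [] is never used: i is in range);
-- .get("description") is Dict.get? (None = none), so the filtered list holds Option String, exactly as Python's holds str/None.
def transaction_count (transaction_list : List (List (String × String))) (transaction_type : List String) : List (String × Int) :=
  let list_of_transaction : List (Option String) :=
    (PySem.List.pyRange 0 transaction_list.length 1).foldl
      (fun acc i =>
        if (PySem.Dict.ofList (PySem.List.pyGetD transaction_list i [])).get? "description" ≠ some "" then
          acc ++ [(PySem.Dict.ofList (PySem.List.pyGetD transaction_list i [])).get? "description"]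
        else acc) []
  let counted_transactions := PySem.Dict.counter list_of_transaction
  let output_dict := transaction_type.foldl
    (fun od types => od.insert types (counted_transactions.getD (some types) 0)) PySem.Dict.empty
  output_dict.items

-- ===== PORT B =====
def transaction_count_alt (transaction_list : List (List (String × String))) (transaction_type : List String) : List (String × Int) :=
  (transaction_type.foldl
    (fun od t => od.insert t
      (if t = "" then 0 else
        ((transaction_list.countP
          (fun tr => (PySem.Dict.ofList tr).get? "description" == some t) : Int))))
    PySem.Dict.empty).items

-- ===== PRECONDITION & SPEC =====
def Spec_transaction_count (transaction_list : List (List (String × String))) (transaction_type : List String) (out : List (String × Int)) : Prop := out = transaction_count_alt transaction_list transaction_type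
instance (transaction_list : List (List (String × String))) (transaction_type : List String) (out : List (String × Int)) : Decidable (Spec_transaction_count transaction_list transaction_type out) := by unfold Spec_transaction_count; infer_instance

-- ===== CLAIM (what is proved, stated in full; the proofs are below) =====
def Claim_equal_transaction_count : Prop := ∀ (transaction_list : List (List (String × String))) (transaction_type : List String), Dom_transaction_count transaction_list transaction_type → Spec_transaction_count transaction_list transaction_type (transaction_count transaction_list transaction_type)

-- ===== LEMMAS AND PROOFS =====
-- A's append-loop over transactions, as filter-then-map (Prop-valued `if`, so stated for our step function).
theorem pv_foldl_filter (l : List (List (String × String))) (acc : List (Option String)) :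
    l.foldl
      (fun acc tr =>
        if (PySem.Dict.ofList tr).get? "description" ≠ some "" then
          acc ++ [(PySem.Dict.ofList tr).get? "description"] else acc) acc
    = acc ++ (l.filter
        (fun tr => !((PySem.Dict.ofList tr).get? "description" == some ""))).map
        (fun tr => (PySem.Dict.ofList tr).get? "description") := by
  induction l generalizing acc with
  | nil => simp
  | cons tr l ih =>
    rw [List.foldl_cons]
    by_cases h : (PySem.Dict.ofList tr).get? "description" = some ""
    · rw [if_neg (by simp [h]), ih]
      simp [h]
    · rw [if_pos h, ih]
      simp [h]

-- For each requested type, A's Counter lookup equals B's direct countP.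
theorem pv_value_eq (transaction_list : List (List (String × String))) (t : String) :
    (PySem.Dict.counter
      ((PySem.List.pyRange 0 transaction_list.length 1).foldl
        (fun (acc : List (Option String)) i =>
          if (PySem.Dict.ofList (PySem.List.pyGetD transaction_list i [])).get? "description" ≠ some "" then
            acc ++ [(PySem.Dict.ofList (PySem.List.pyGetD transaction_list i [])).get? "description"]
          else acc) [])).getD (some t) 0
    = (if t = "" then 0 else
        ((transaction_list.countP
          (fun tr => (PySem.Dict.ofList tr).get? "description" == some t) : Int)) : Int) := by
  rw [show ((transaction_list.length : Int)) = PySem.List.len transaction_list from (PySem.List.len_eq _).symm]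
  rw [PySem.List.foldl_pyRange_zero_pyGetD transaction_list []
      (fun (acc : List (Option String)) tr =>
        if (PySem.Dict.ofList tr).get? "description" ≠ some "" then
          acc ++ [(PySem.Dict.ofList tr).get? "description"] else acc) []]
  rw [pv_foldl_filter, PySem.Dict.getD_counter]
  simp only [List.count_eq_countP, List.countP_map, List.countP_filter, List.nil_append]
  by_cases ht : t = ""
  · subst ht
    rw [if_pos rfl, List.countP_eq_zero.mpr]
    · rfl
    · intro tr _
      by_cases h : (PySem.Dict.ofList tr).get? "description" = some ""
      · simp [h]
      · simp
  · rw [if_neg ht]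
    congr 1
    apply List.countP_congr
    intro tr _
    simp only [Function.comp, beq_iff_eq, Bool.and_eq_true, Bool.not_eq_eq_eq_not, Bool.not_true,
      beq_eq_false_iff_ne, ne_eq]
    constructor
    · rintro ⟨h1, _⟩; exact h1
    · intro h1
      refine ⟨h1, ?_⟩
      rw [h1]
      simp [ht]

-- ===== VERDICT (by name: the statement is the Claim_ definition above) =====
theorem transaction_count_spec : Claim_equal_transaction_count := by
  intro transaction_list transaction_type _
  unfold Spec_transaction_count transaction_count transaction_count_alt
  dsimp only []
  congr 1
  apply List.foldl_ext
  intro od t _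
  rw [pv_value_eq]
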